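-- pv_equiv track=rewrite | github.com/kkobanenko/1C_Autoconnector | utils/db_connection.py | get_db_signature_from_connection_string
-- ===== SOURCE A (Python) =====
-- from typing import Optional
--
-- def get_db_signature(host: str, database: str) -> str:
--     """
--     Стабильная подпись пары «сервер + база» для привязки кэшей и UI к конкретной БД.
--     Логин/пароль сюда не входят: индексы на диске в StructureAnalyzer именуются по host+database.
--     """
--     h = (host or "").strip()
--     d = (database or "").strip()
--     return f"{h}|{d}"
--
-- def get_db_signature_from_connection_string(connection_string: Optional[str] = None) -> str:
--     """Извлекает Server и Database из строки подключения и возвращает get_db_signature(...)."""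
--     if not connection_string:
--         return "|"
--     host, database = "unknown", "unknown"
--     for part in connection_string.split(";"):
--         part = part.strip()
--         if "=" not in part:
--             continue
--         key, val = part.split("=", 1)
--         kl = key.strip().lower()
--         if kl == "server":
--             host = val.strip()
--         elif kl == "database":
--             database = val.strip()
--     return get_db_signature(host, database)
-- ===== SOURCE B (Python) =====
-- from typing import Optional
--
-- def get_db_signature(host: str, database: str) -> str:
--     h = (host or "").strip()
--     d = (database or "").strip()
--     return f"{h}|{d}"
--
-- def _last_value(parts, key):
--     """Last-wins lookup: scan the parts back to front, return the first match."""
--     for part in reversed(parts):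
--         part = part.strip()
--         if "=" not in part:
--             continue
--         k, v = part.split("=", 1)
--         if k.strip().lower() == key:
--             return v.strip()
--     return "unknown"
--
-- def get_db_signature_from_connection_string(connection_string: Optional[str] = None) -> str:
--     if not connection_string:
--         return "|"
--     parts = connection_string.split(";")
--     return get_db_signature(_last_value(parts, "server"), _last_value(parts, "database"))
-- ===== Notes on version B (the rewrite author's own statement) =====
-- stated objective: alternative
-- what changed: Replaces A's single forward pass that mutates host/database accumulator state with two independent back-to-front scans that early-return the last-wins value for each key.
import Mathlib
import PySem

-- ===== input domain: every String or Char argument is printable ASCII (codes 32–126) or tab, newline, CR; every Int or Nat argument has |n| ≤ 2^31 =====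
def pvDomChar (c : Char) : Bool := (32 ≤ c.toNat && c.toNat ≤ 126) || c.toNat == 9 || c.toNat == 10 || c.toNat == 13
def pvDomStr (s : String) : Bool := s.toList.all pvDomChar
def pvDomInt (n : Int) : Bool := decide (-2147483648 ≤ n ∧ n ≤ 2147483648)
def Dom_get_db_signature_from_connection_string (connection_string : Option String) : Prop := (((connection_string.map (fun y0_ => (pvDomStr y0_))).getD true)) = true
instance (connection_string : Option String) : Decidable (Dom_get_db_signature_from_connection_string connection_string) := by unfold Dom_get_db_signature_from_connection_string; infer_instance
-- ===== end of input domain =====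

-- B replaces A's single forward pass with mutating host/database accumulators by two
-- independent back-to-front scans that early-return the last-wins value for each key
-- (objective: alternative; same cost).

-- ===== PORT A =====
-- sep ";" ≠ "" so split? below is always some; shared module helper get_db_signature: '(x or "").strip()' = strip x (strip "" = "")
def get_db_signature (host database : String) : String :=
  PySem.Str.strip host ++ "|" ++ PySem.Str.strip database

-- the body of A's for-loop, named so the proofs can speak about it
def pvStepA (hd : String × String) (part : String) : String × String :=
  let p := PySem.Str.strip part
  if PySem.Str.isIn "=" p then
    match PySem.Str.splitMax? p "=" 1 with
    | some [key, val] =>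
      let kl := PySem.Str.lower (PySem.Str.strip key)
      if kl = "server" then (PySem.Str.strip val, hd.2)
      else if kl = "database" then (hd.1, PySem.Str.strip val)
      else hd
    | _ => hd   -- unreachable when "=" is in p: split(sep, 1) then yields exactly two pieces
  else hd

def get_db_signature_from_connection_string (connection_string : Option String) : String :=
  match connection_string with
  | none => "|"
  | some cs =>
    if cs = "" then "|"
    else
      let st := ((PySem.Str.split? cs ";").getD []).foldl pvStepA ("unknown", "unknown")
      get_db_signature st.1 st.2

-- ===== PORT B =====
-- B helper _last_value: scan back to front, return the first (= last-wins) value for key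
def pvLastValue (parts : List String) (key : String) : String :=
  match parts with
  | [] => "unknown"
  | part :: rest =>
    let p := PySem.Str.strip part
    if PySem.Str.isIn "=" p then
      match PySem.Str.splitMax? p "=" 1 with
      | some [k, v] =>
        if PySem.Str.lower (PySem.Str.strip k) = key then PySem.Str.strip v
        else pvLastValue rest key
      | _ => pvLastValue rest key
    else pvLastValue rest key

def get_db_signature_from_connection_string_alt (connection_string : Option String) : String :=
  match connection_string with
  | none => "|"
  | some cs =>
    if cs = "" then "|"
    else
      let parts := ((PySem.Str.split? cs ";").getD []).reverse
      get_db_signature (pvLastValue parts "server") (pvLastValue parts "database")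

-- ===== PRECONDITION & SPEC =====
def Spec_get_db_signature_from_connection_string (connection_string : Option String) (out : String) : Prop := out = get_db_signature_from_connection_string_alt connection_string
instance (connection_string : Option String) (out : String) : Decidable (Spec_get_db_signature_from_connection_string connection_string out) := by unfold Spec_get_db_signature_from_connection_string; infer_instance

-- ===== CLAIM (what is proved, stated in full; the proofs are below) =====
def Claim_equal_get_db_signature_from_connection_string : Prop := ∀ (connection_string : Option String), Dom_get_db_signature_from_connection_string connection_string → Spec_get_db_signature_from_connection_string connection_string (get_db_signature_from_connection_string connection_string)

-- ===== LEMMAS AND PROOFS =====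

-- pvLastValue generalized over the value returned when no part matches
def pvLvD (parts : List String) (key dflt : String) : String :=
  match parts with
  | [] => dflt
  | part :: rest =>
    let p := PySem.Str.strip part
    if PySem.Str.isIn "=" p then
      match PySem.Str.splitMax? p "=" 1 with
      | some [k, v] =>
        if PySem.Str.lower (PySem.Str.strip k) = key then PySem.Str.strip v
        else pvLvD rest key dflt
      | _ => pvLvD rest key dflt
    else pvLvD rest key dflt

lemma pvLvD_unknown (parts : List String) (key : String) :
    pvLvD parts key "unknown" = pvLastValue parts key := by
  induction parts with
  | nil => rfl
  | cons part rest ih =>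
    simp only [pvLvD, pvLastValue]
    cases hI : PySem.Str.isIn "=" (PySem.Str.strip part) with
    | false => simp only [Bool.false_eq_true, if_false]; exact ih
    | true =>
      simp only [if_true]
      cases hS : PySem.Str.splitMax? (PySem.Str.strip part) "=" 1 with
      | none => exact ih
      | some l =>
        match l with
        | [] => exact ih
        | [_] => exact ih
        | [k, v] => simp only []; split <;> [rfl; exact ih]
        | _ :: _ :: _ :: _ => exact ih

lemma pvLvD_append (l l' : List String) (key dflt : String) :
    pvLvD (l ++ l') key dflt = pvLvD l key (pvLvD l' key dflt) := by
  induction l with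
  | nil => rfl
  | cons part rest ih =>
    simp only [List.cons_append, pvLvD]
    cases hI : PySem.Str.isIn "=" (PySem.Str.strip part) with
    | false => simp only [Bool.false_eq_true, if_false]; exact ih
    | true =>
      simp only [if_true]
      cases hS : PySem.Str.splitMax? (PySem.Str.strip part) "=" 1 with
      | none => exact ih
      | some l0 =>
        match l0 with
        | [] => exact ih
        | [_] => exact ih
        | [k, v] => simp only []; split <;> [rfl; exact ih]
        | _ :: _ :: _ :: _ => exact ih

set_option maxHeartbeats 1000000 in
lemma pvStepA_eq (hd : String × String) (p : String) :
    pvStepA hd p = (pvLvD [p] "server" hd.1, pvLvD [p] "database" hd.2) := by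
  simp only [pvStepA, pvLvD]
  cases hI : PySem.Str.isIn "=" (PySem.Str.strip p) with
  | false => simp only [Bool.false_eq_true, if_false]
  | true =>
    simp only [if_true]
    cases hS : PySem.Str.splitMax? (PySem.Str.strip p) "=" 1 with
    | none => rfl
    | some l =>
      match l with
      | [] => rfl
      | [_] => rfl
      | [k, v] =>
        simp only []
        by_cases h1 : PySem.Str.lower (PySem.Str.strip k) = "server"
        · rw [h1]; simp
        · by_cases h2 : PySem.Str.lower (PySem.Str.strip k) = "database"
          · rw [if_neg h1, if_pos h2, if_neg h1, if_pos h2]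
          · rw [if_neg h1, if_neg h2, if_neg h1, if_neg h2]
      | _ :: _ :: _ :: _ => rfl

lemma foldl_eq_lvD (parts : List String) (hd : String × String) :
    parts.foldl pvStepA hd
      = (pvLvD parts.reverse "server" hd.1, pvLvD parts.reverse "database" hd.2) := by
  induction parts generalizing hd with
  | nil => rfl
  | cons part rest ih =>
    simp only [List.foldl_cons, List.reverse_cons, ih, pvLvD_append, pvStepA_eq]

-- ===== VERDICT (by name: the statement is the Claim_ definition above) =====
theorem get_db_signature_from_connection_string_spec : Claim_equal_get_db_signature_from_connection_string := by
  intro cs _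
  unfold Spec_get_db_signature_from_connection_string
  cases cs with
  | none => rfl
  | some s =>
    simp only [get_db_signature_from_connection_string,
      get_db_signature_from_connection_string_alt]
    by_cases hE : s = ""
    · simp only [hE, if_true]
    · simp only [hE, if_false, foldl_eq_lvD, pvLvD_unknown]
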